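-- pv_equiv track=rewrite | github.com/cpurules/jirachi-core | jirachi_core/utils.py | read_bytes_to_decimal
-- ===== SOURCE A (Python) =====
-- def read_bytes_to_decimal(bts, bcd=False):
--     dec = 0
--     power = len(bts) - 1
--
--     for b in bts:
--         if bcd:
--             dec = dec + int(hex(b)[2:]) * pow(10, power * 2)
--         else:
--             dec = dec + b * pow(256, power)
--
--         power = power - 1
--
--     return dec
-- ===== SOURCE B (Python) =====
-- def read_bytes_to_decimal(bts, bcd=False):
--     dec = 0
--     if bcd:
--         for b in bts:
--             dec = 100 * dec + int(hex(b)[2:])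
--     else:
--         for b in bts:
--             dec = 256 * dec + b
--     return dec
-- ===== Notes on version B (the rewrite author's own statement) =====
-- stated objective: faster
-- what changed: Replaces per-element positional weighting with pow(256, power)/pow(10, 2*power) by Horner accumulation dec = dec*base + digit, removing the repeated bignum pow and the power counter.
import Mathlib
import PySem

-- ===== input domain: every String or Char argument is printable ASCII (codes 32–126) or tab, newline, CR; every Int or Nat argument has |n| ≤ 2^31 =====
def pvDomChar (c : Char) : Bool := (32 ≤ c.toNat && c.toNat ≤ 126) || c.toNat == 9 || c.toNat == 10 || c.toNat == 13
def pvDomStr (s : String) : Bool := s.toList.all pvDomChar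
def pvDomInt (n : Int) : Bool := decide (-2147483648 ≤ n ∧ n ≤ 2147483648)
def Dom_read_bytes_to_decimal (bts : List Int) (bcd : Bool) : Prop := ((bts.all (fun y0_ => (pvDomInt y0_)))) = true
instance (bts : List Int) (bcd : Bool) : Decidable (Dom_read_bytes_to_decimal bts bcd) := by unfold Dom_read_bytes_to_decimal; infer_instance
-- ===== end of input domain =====

-- B replaces A's per-element pow(base, power) weighting by a single Horner pass (dec = dec*base + digit); faster.

-- ===== PORT A =====
-- hex(b) as a character list: '-0x…' for negative, '0x…' otherwise (exact for Python hex on ints)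
def pyHexChars (b : Int) : List Char :=
  if b < 0 then '-' :: '0' :: 'x' :: Nat.toDigits 16 (-b).toNat
  else '0' :: 'x' :: Nat.toDigits 16 b.toNat

-- int(hex(b)[2:]): [2:] is drop 2 on the characters; int(…) is PySem.Int.ofChars?
-- (none = ValueError, excluded by Pre_; .getD 0 is never the value on admitted inputs)
def bcdVal (b : Int) : Int := (PySem.Int.ofChars? ((pyHexChars b).drop 2)).getD 0

-- the for-loop of A, state (dec, power)
def aLoop (bcd : Bool) : List Int → Int → Int → Int
  | [], dec, _ => dec
  | b :: t, dec, power =>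
      aLoop bcd t
        (if bcd then dec + bcdVal b * 10 ^ (power * 2).toNat
         else dec + b * 256 ^ power.toNat)
        (power - 1)

def read_bytes_to_decimal (bts : List Int) (bcd : Bool) : Int :=
  aLoop bcd bts 0 ((bts.length : Int) - 1)

-- ===== PORT B =====
def hornerBcd : List Int → Int → Int
  | [], dec => dec
  | b :: t, dec => hornerBcd t (100 * dec + bcdVal b)

def horner256 : List Int → Int → Int
  | [], dec => dec
  | b :: t, dec => horner256 t (256 * dec + b)

def read_bytes_to_decimal_alt (bts : List Int) (bcd : Bool) : Int :=
  if bcd then hornerBcd bts 0 else horner256 bts 0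

-- ===== PRECONDITION & SPEC =====
-- Pre_ excludes exactly the inputs where Python A raises ValueError: in bcd mode a
-- negative byte or one whose hex form contains a letter digit makes int(hex(b)[2:]) fail.
def Pre_read_bytes_to_decimal (bts : List Int) (bcd : Bool) : Prop :=
  bcd = true → ∀ b ∈ bts, 0 ≤ b ∧ ∀ k ∈ List.range 8, b / 16 ^ k % 16 < 10
instance (bts : List Int) (bcd : Bool) : Decidable (Pre_read_bytes_to_decimal bts bcd) := by
  unfold Pre_read_bytes_to_decimal; infer_instance

def pvWitness_read_bytes_to_decimal : List Int × Bool := ([18, 66], true)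

def Spec_read_bytes_to_decimal (bts : List Int) (bcd : Bool) (out : Int) : Prop := out = read_bytes_to_decimal_alt bts bcd
instance (bts : List Int) (bcd : Bool) (out : Int) : Decidable (Spec_read_bytes_to_decimal bts bcd out) := by unfold Spec_read_bytes_to_decimal; infer_instance

-- ===== CLAIM (what is proved, stated in full; the proofs are below) =====
def Claim_equal_read_bytes_to_decimal : Prop := ∀ (bts : List Int) (bcd : Bool), Dom_read_bytes_to_decimal bts bcd → Pre_read_bytes_to_decimal bts bcd → Spec_read_bytes_to_decimal bts bcd (read_bytes_to_decimal bts bcd)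

-- ===== LEMMAS AND PROOFS =====

theorem horner256_shift (t : List Int) : ∀ a : Int, horner256 t a = a * 256 ^ t.length + horner256 t 0 := by
  induction t with
  | nil => intro a; simp [horner256]
  | cons b t ih =>
      intro a
      simp only [horner256, List.length_cons]
      rw [ih (256 * 0 + b), ih (256 * a + b)]
      ring

theorem hornerBcd_shift (t : List Int) : ∀ a : Int, hornerBcd t a = a * 100 ^ t.length + hornerBcd t 0 := by
  induction t with
  | nil => intro a; simp [hornerBcd]
  | cons b t ih =>
      intro a
      simp only [hornerBcd, List.length_cons]
      rw [ih (100 * 0 + bcdVal b), ih (100 * a + bcdVal b)]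
      ring

theorem aLoop_false (t : List Int) : ∀ dec : Int, aLoop false t dec ((t.length : Int) - 1) = dec + horner256 t 0 := by
  induction t with
  | nil => intro dec; simp [aLoop, horner256]
  | cons b t ih =>
      intro dec
      have h1 : ((b :: t).length : Int) - 1 = (t.length : Int) := by simp
      rw [h1]
      show aLoop false t (dec + b * 256 ^ ((t.length : Int)).toNat) ((t.length : Int) - 1) = _
      rw [ih, Int.toNat_natCast]
      simp only [horner256]
      rw [horner256_shift t (256 * 0 + b)]
      ring

theorem aLoop_true (t : List Int) : ∀ dec : Int, aLoop true t dec ((t.length : Int) - 1) = dec + hornerBcd t 0 := by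
  induction t with
  | nil => intro dec; simp [aLoop, hornerBcd]
  | cons b t ih =>
      intro dec
      have h1 : ((b :: t).length : Int) - 1 = (t.length : Int) := by simp
      rw [h1]
      show aLoop true t (dec + bcdVal b * 10 ^ (((t.length : Int)) * 2).toNat) ((t.length : Int) - 1) = _
      have h2 : (((t.length : Int)) * 2).toNat = 2 * t.length := by omega
      rw [ih, h2]
      have h3 : (10 : Int) ^ (2 * t.length) = 100 ^ t.length := by
        rw [pow_mul]; norm_num
      rw [h3]
      simp only [hornerBcd]
      rw [hornerBcd_shift t (100 * 0 + bcdVal b)]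
      ring

-- ===== VERDICT (by name: the statement is the Claim_ definition above) =====
theorem read_bytes_to_decimal_spec : Claim_equal_read_bytes_to_decimal := by
  intro bts bcd _ _
  unfold Spec_read_bytes_to_decimal read_bytes_to_decimal read_bytes_to_decimal_alt
  cases bcd with
  | false => rw [aLoop_false]; simp
  | true => rw [aLoop_true]; simp
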